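-- pv_equiv track=rewrite | github.com/WantHoney/ai-emotion-platform | backend/ser-service/training/merge_manifests.py | resolve_header
-- ===== SOURCE A (Python) =====
-- PREFERRED_COLUMNS = [
--     "path",
--     "label",
--     "source_label",
--     "duration_sec",
--     "source_dataset",
--     "language",
--     "speaker",
--     "file_id",
--     "text",
--     "transcript",
-- ]
--
-- def resolve_header(rows: list[dict[str, str]]) -> list[str]:
--     fields: set[str] = set()
--     for row in rows:
--         fields.update(k for k in row.keys() if isinstance(k, str) and k.strip())
--
--     # Ensure core fields always exist.
--     fields.update({"path", "label", "source_dataset"})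
--
--     header: list[str] = []
--     for key in PREFERRED_COLUMNS:
--         if key in fields:
--             header.append(key)
--             fields.remove(key)
--
--     # Deterministic order for long-tail fields.
--     header.extend(sorted(fields))
--     return header
-- ===== SOURCE B (Python) =====
-- PREFERRED_COLUMNS = [
--     "path",
--     "label",
--     "source_label",
--     "duration_sec",
--     "source_dataset",
--     "language",
--     "speaker",
--     "file_id",
--     "text",
--     "transcript",
-- ]
--
-- def resolve_header(rows: list[dict[str, str]]) -> list[str]:
--     fields = {k for row in rows for k in row.keys() if isinstance(k, str) and k.strip()}
--     fields |= {"path", "label", "source_dataset"}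
--     rank = {col: i for i, col in enumerate(PREFERRED_COLUMNS)}
--     sentinel = len(PREFERRED_COLUMNS)
--     return sorted(fields, key=lambda f: (rank.get(f, sentinel), f))
-- ===== Notes on version B (the rewrite author's own statement) =====
-- stated objective: idiomatic
-- what changed: A builds the header by scanning PREFERRED_COLUMNS, appending matches while removing them from the field set, then appending the sorted leftovers; B precomputes a rank map from PREFERRED_COLUMNS and produces the whole header with one sort of the field set keyed by (rank-or-sentinel, name).
import Mathlib
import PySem

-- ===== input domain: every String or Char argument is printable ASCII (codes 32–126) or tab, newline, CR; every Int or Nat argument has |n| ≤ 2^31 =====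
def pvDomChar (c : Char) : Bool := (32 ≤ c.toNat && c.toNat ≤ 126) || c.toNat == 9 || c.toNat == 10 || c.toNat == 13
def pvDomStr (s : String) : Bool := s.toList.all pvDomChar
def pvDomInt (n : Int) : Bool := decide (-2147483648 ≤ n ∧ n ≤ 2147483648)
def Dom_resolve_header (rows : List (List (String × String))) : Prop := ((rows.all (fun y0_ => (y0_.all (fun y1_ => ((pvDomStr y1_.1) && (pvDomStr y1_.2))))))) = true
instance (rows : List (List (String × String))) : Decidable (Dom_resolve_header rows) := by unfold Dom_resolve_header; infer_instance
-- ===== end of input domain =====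

-- B replaces A's preferred-column scan + removal + sorted tail by ONE keyed sort with a
-- precomputed rank map (objective: idiomatic; same asymptotic cost).

-- ===== PORT A =====
def pvPreferred : List String :=
  ["path", "label", "source_label", "duration_sec", "source_dataset",
   "language", "speaker", "file_id", "text", "transcript"]

-- 'isinstance(k, str)' is always true on the typed input and is dropped;
-- 'fields.remove(key)' under the 'key in fields' guard is Set.discard.
def resolve_header (rows : List (List (String × String))) : List String :=
  let fields0 : PySem.Set String :=
    rows.foldl (fun s row =>
      PySem.Set.update s ((row.map Prod.fst).filter (fun k => !(PySem.Str.strip k == "")))) PySem.Set.empty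
  let fields1 : PySem.Set String := PySem.Set.update fields0 ["path", "label", "source_dataset"]
  let st :=
    pvPreferred.foldl (fun (st : List String × PySem.Set String) key =>
      if PySem.Set.contains st.2 key then (st.1 ++ [key], PySem.Set.discard st.2 key) else st)
      ([], fields1)
  st.1 ++ PySem.List.sorted st.2 (fun x => x) false

-- ===== PORT B =====
-- _RANK = {col: i for i, col in enumerate(PREFERRED_COLUMNS)}
def pvRank : PySem.Dict String Int :=
  (PySem.List.enumerate pvPreferred 0).foldl (fun d p => PySem.Dict.insert d p.2 p.1) PySem.Dict.empty

-- _SENT = len(PREFERRED_COLUMNS)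
def pvSentinel : Int := PySem.List.len pvPreferred

def resolve_header_alt (rows : List (List (String × String))) : List String :=
  let fields : PySem.Set String :=
    PySem.Set.union
      (PySem.Set.ofList (rows.flatMap (fun row =>
        (row.map Prod.fst).filter (fun k => !(PySem.Str.strip k == "")))))
      ["path", "label", "source_dataset"]
  PySem.List.sorted2 fields (fun f => PySem.Dict.getD pvRank f pvSentinel) (fun f => f) false

-- ===== PRECONDITION & SPEC =====
def Spec_resolve_header (rows : List (List (String × String))) (out : List String) : Prop := out = resolve_header_alt rows
instance (rows : List (List (String × String))) (out : List String) : Decidable (Spec_resolve_header rows out) := by unfold Spec_resolve_header; infer_instance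

-- ===== CLAIM (what is proved, stated in full; the proofs are below) =====
def Claim_equal_resolve_header : Prop := ∀ (rows : List (List (String × String))), Dom_resolve_header rows → Spec_resolve_header rows (resolve_header rows)

-- ===== LEMMAS AND PROOFS =====

-- B's composite sort key, as one lexicographic value.
def pvKey (f : String) : Lex (Int × String) := toLex (PySem.Dict.getD pvRank f pvSentinel, f)

-- sorted2 with keys (rank, id) is sorted with the single lexicographic key pvKey.
theorem pv_sorted2_eq_sorted_lex (xs : List String) :
    PySem.List.sorted2 xs (fun f => PySem.Dict.getD pvRank f pvSentinel) (fun f => f) false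
      = PySem.List.sorted xs pvKey false := by
  show List.foldl (fun acc x => PySem.List.insertBy
      (fun a b => decide (PySem.Dict.getD pvRank a pvSentinel < PySem.Dict.getD pvRank b pvSentinel)
        || (!decide (PySem.Dict.getD pvRank b pvSentinel < PySem.Dict.getD pvRank a pvSentinel)
            && decide (a < b))) x acc) [] xs
    = List.foldl (fun acc x => PySem.List.insertBy
      (fun a b => decide (pvKey a < pvKey b)) x acc) [] xs
  have hb : (fun a b => decide (PySem.Dict.getD pvRank a pvSentinel < PySem.Dict.getD pvRank b pvSentinel)
        || (!decide (PySem.Dict.getD pvRank b pvSentinel < PySem.Dict.getD pvRank a pvSentinel)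
            && decide ((a : String) < b)))
      = (fun a b => decide (pvKey a < pvKey b)) := by
    funext a b
    rcases lt_trichotomy (PySem.Dict.getD pvRank a pvSentinel) (PySem.Dict.getD pvRank b pvSentinel) with h | h | h
    · simp [pvKey, Prod.Lex.lt_iff, h, h.ne, asymm h]
    · simp [pvKey, Prod.Lex.lt_iff, h]
    · simp [pvKey, Prod.Lex.lt_iff, h, h.ne', asymm h]
  rw [hb]

theorem pv_rank_eq : pvRank = PySem.Dict.mk
    [("path", 0), ("label", 1), ("source_label", 2), ("duration_sec", 3), ("source_dataset", 4),
     ("language", 5), ("speaker", 6), ("file_id", 7), ("text", 8), ("transcript", 9)] := by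
  decide

theorem pv_rank_lt_of_mem (f : String) (hf : f ∈ pvPreferred) :
    PySem.Dict.getD pvRank f pvSentinel < 10 := by
  fin_cases hf <;> decide

theorem pv_rank_eq_sentinel (f : String) (hf : f ∉ pvPreferred) :
    PySem.Dict.getD pvRank f pvSentinel = 10 := by
  simp [pvPreferred] at hf
  obtain ⟨h1, h2, h3, h4, h5, h6, h7, h8, h9, h10⟩ := hf
  rw [pv_rank_eq]
  simp [PySem.Dict.getD, PySem.Dict.get?, Ne.symm h1, Ne.symm h2, Ne.symm h3, Ne.symm h4, Ne.symm h5,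
    Ne.symm h6, Ne.symm h7, Ne.symm h8, Ne.symm h9, Ne.symm h10, pvSentinel, pvPreferred]

-- A's preferred-column loop, characterised: it appends the preferred columns present in s
-- (in preferred order) and leaves in s exactly the non-preferred fields.
theorem pv_loop_char (P : List String) (hP : P.Nodup) (h s : List String) :
    P.foldl (fun (st : List String × PySem.Set String) key =>
        if PySem.Set.contains st.2 key then (st.1 ++ [key], PySem.Set.discard st.2 key) else st)
      (h, s)
    = (h ++ P.filter (fun k => s.contains k), s.filter (fun x => !(P.contains x))) := by
  induction P generalizing h s with
  | nil => simp
  | cons k P' ih =>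
    rcases List.nodup_cons.mp hP with ⟨hkP, hP'⟩
    by_cases hc : PySem.Set.contains s k = true
    · rw [List.foldl_cons]
      simp only [hc, if_true]
      rw [ih hP']
      simp only [Prod.mk.injEq]
      constructor
      · -- header component
        rw [List.filter_cons_of_pos (by simpa [PySem.Set.contains] using hc)]
        rw [List.filter_congr
            (by
              intro x hx
              have hxk : x ≠ k := fun e => hkP (e ▸ hx)
              show List.contains (PySem.Set.discard s k) x = List.contains s x
              simp [PySem.Set.discard, List.mem_filter, hxk])]
        simp only [List.append_assoc, List.singleton_append]
      · -- fields component
        simp only [PySem.Set.discard, List.filter_filter]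
        apply List.filter_congr
        intro x _
        by_cases hxk : x = k <;> simp [hxk]
    · have hc' : PySem.Set.contains s k = false := by simpa using hc
      rw [List.foldl_cons]
      simp only [hc', Bool.false_eq_true, if_false]
      rw [ih hP']
      simp only [Prod.mk.injEq]
      constructor
      · rw [List.filter_cons_of_neg (by simpa [PySem.Set.contains] using hc)]
      · apply List.filter_congr
        intro x hx
        have hxk : x ≠ k := by
          intro e; subst e
          exact absurd (by simpa [PySem.Set.contains] using hx : PySem.Set.contains s x = true) hc
        simp [hxk]

theorem pv_preferred_nodup : pvPreferred.Nodup := by decide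

theorem pv_rank_pairwise :
    List.Pairwise (fun a b => PySem.Dict.getD pvRank a pvSentinel < PySem.Dict.getD pvRank b pvSentinel) pvPreferred := by
  decide

-- ===== VERDICT (by name: the statement is the Claim_ definition above) =====
theorem resolve_header_spec : Claim_equal_resolve_header := by
  intro rows _
  unfold Spec_resolve_header resolve_header resolve_header_alt
  dsimp only
  -- shared field set
  set L : List String := rows.flatMap (fun row =>
      (row.map Prod.fst).filter (fun k => !(PySem.Str.strip k == ""))) with hL
  have hfields :
      (rows.foldl (fun s row =>
        PySem.Set.update s ((row.map Prod.fst).filter (fun k => !(PySem.Str.strip k == "")))) PySem.Set.empty)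
      = PySem.Set.ofList L := by
    simp [PySem.Set.update, PySem.Set.ofList, PySem.Set.empty, hL, List.foldl_flatMap]
  rw [hfields]
  set F : PySem.Set String :=
    PySem.Set.update (PySem.Set.ofList L) ["path", "label", "source_dataset"] with hFdef
  have hFofList : F = PySem.Set.ofList (L ++ ["path", "label", "source_dataset"]) := by
    simp [hFdef, PySem.Set.update, PySem.Set.ofList, PySem.Set.empty, List.foldl_append]
  have hFnodup : F.Nodup := by rw [hFofList]; exact PySem.Set.nodup_ofList _
  show _ = PySem.List.sorted2 (PySem.Set.union (PySem.Set.ofList L) _) _ _ false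
  rw [show PySem.Set.union (PySem.Set.ofList L) ["path", "label", "source_dataset"] = F from rfl]
  rw [pv_sorted2_eq_sorted_lex]
  rw [pv_loop_char pvPreferred pv_preferred_nodup [] F]
  simp only [List.nil_append]
  -- name the two halves of A's answer
  set pref : List String := pvPreferred.filter (fun k => F.contains k) with hpref
  set tail : List String := PySem.List.sorted (F.filter (fun x => !(pvPreferred.contains x))) (fun x => x) false with htail
  symm
  apply PySem.List.sorted_eq_of_perm_of_pairwise_lt
  · -- permutation: pref ++ tail ~ F
    have h1 : tail.Perm (F.filter (fun x => !(pvPreferred.contains x))) :=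
      PySem.List.sorted_perm _ _ _
    have h2 : pref.Perm (F.filter (fun x => pvPreferred.contains x)) := by
      rw [List.perm_ext_iff_of_nodup (List.Nodup.filter _ pv_preferred_nodup) (List.Nodup.filter _ hFnodup)]
      intro a
      simp [List.mem_filter, and_comm]
    exact (List.Perm.append h2 h1).trans (List.filter_append_perm _ F)
  · -- strict pairwise order of pref ++ tail under pvKey
    rw [List.pairwise_append]
    refine ⟨?_, ?_, ?_⟩
    · -- within pref: ranks strictly increase along pvPreferred
      exact List.Pairwise.imp
        (fun h => Prod.Lex.lt_iff.mpr (Or.inl h))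
        (List.Pairwise.sublist (List.filter_sublist) pv_rank_pairwise)
    · -- within tail: equal sentinel ranks, strictly increasing names
      have hnd : tail.Nodup :=
        ((PySem.List.sorted_perm _ _ _).nodup_iff).mpr (List.Nodup.filter _ hFnodup)
      have hle : List.Pairwise (fun a b : String => a ≤ b) tail :=
        PySem.List.sorted_pairwise _ _
      have hlt : List.Pairwise (fun a b : String => a < b) tail :=
        (hle.and (List.Pairwise.imp (fun h => h) hnd)).imp (fun ⟨h1, h2⟩ => lt_of_le_of_ne h1 h2)
      have hmem : ∀ x ∈ tail, x ∉ pvPreferred := by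
        intro x hx
        have := (PySem.List.sorted_perm _ _ _).mem_iff.mp hx
        rcases List.mem_filter.mp this with ⟨_, hnp⟩
        simpa using hnp
      refine List.Pairwise.imp_of_mem ?_ hlt
      intro a b ha hb h
      refine Prod.Lex.lt_iff.mpr (Or.inr ⟨?_, by simpa [pvKey] using h⟩)
      simp [pvKey, pv_rank_eq_sentinel a (hmem a ha), pv_rank_eq_sentinel b (hmem b hb)]
    · -- across: every preferred rank < sentinel
      intro a ha b hb
      have haP : a ∈ pvPreferred := (List.mem_filter.mp ha).1
      have hbP : b ∉ pvPreferred := by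
        have := (PySem.List.sorted_perm _ _ _).mem_iff.mp hb
        rcases List.mem_filter.mp this with ⟨_, hnp⟩
        simpa using hnp
      refine Prod.Lex.lt_iff.mpr (Or.inl ?_)
      show PySem.Dict.getD pvRank a pvSentinel < PySem.Dict.getD pvRank b pvSentinel
      rw [pv_rank_eq_sentinel b hbP]
      exact pv_rank_lt_of_mem a haP
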